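-- pv_equiv track=rewrite | github.com/981377660LMT/algorithm-study | 5_map/经典例题/Blocked Pipeline.py | solve
-- ===== SOURCE A (Python) =====
-- def solve(n, requests) -> int:
--     res = 0
--     grid = [[0] * 2 * n for _ in range(2)]
--     blocked = set()  # 用两个点表示一组blocked关系
--
--     for row, col, type in requests:
--         grid[row][col] = type
--         otherRow = row ^ 1
--
--         if type == 1:
--             for nextCol in (col - 1, col, col + 1):
--                 if 0 <= nextCol < 2 * n and grid[otherRow][nextCol] == 1:
--                     blocked.add((row, col, otherRow, nextCol))
--         else:
--             for nextCol in (col - 1, col, col + 1):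
--                 blocked.discard((row, col, otherRow, nextCol))
--                 blocked.discard((otherRow, nextCol, row, col))
--
--         if not blocked:
--             res += 1
--
--     return res
-- ===== SOURCE B (Python) =====
-- def solve(n, requests) -> int:
--     # Stateless re-check: keep only the grid and rescan it for any adjacent
--     # conflict after each request, instead of incrementally maintaining a set
--     # of directed blocked pairs.
--     res = 0
--     grid = [[0] * 2 * n for _ in range(2)]
--     for row, col, type in requests:
--         grid[row][col] = type
--         if not any(
--             grid[0][c] == 1
--             and any(0 <= d < 2 * n and grid[1][d] == 1 for d in (c - 1, c, c + 1))
--             for c in range(2 * n)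
--         ):
--             res += 1
--     return res
-- ===== Notes on version B (the rewrite author's own statement) =====
-- stated objective: simpler
-- what changed: B drops A's incrementally-maintained set of directed blocked pairs entirely and instead rescans the 2x2n grid for any adjacent conflict after each request, so the only state is the grid itself.
-- outside the precondition, e.g. on solve(1, [(0, 0, 1), (-1, 0, 1), (1, 0, 0)]): A returns 1, B returns 2; on solve(1, [(0, -1, 1)]): A returns 1, B returns 1
import Mathlib
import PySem

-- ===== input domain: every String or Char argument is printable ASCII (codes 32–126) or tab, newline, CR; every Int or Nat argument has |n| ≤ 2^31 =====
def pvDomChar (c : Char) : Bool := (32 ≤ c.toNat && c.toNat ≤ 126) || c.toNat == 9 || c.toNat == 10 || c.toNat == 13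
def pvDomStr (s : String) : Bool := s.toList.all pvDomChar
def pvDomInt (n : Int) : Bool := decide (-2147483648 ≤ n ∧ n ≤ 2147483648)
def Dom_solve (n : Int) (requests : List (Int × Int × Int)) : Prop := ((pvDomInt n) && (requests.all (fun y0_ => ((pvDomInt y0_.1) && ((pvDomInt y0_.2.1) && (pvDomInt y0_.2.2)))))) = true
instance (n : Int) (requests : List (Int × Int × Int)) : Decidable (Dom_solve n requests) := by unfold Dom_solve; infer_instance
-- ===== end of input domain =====

-- B replaces A's incrementally maintained set of directed blocked pairs by a plain rescan
-- of the 2×2n grid for an adjacent conflict after each request (simpler state, no speed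
-- claim). A mutates only its local grid; the equivalence is about the return value.

-- ===== PORT A =====
-- grid[r][c] read; the 0/[] defaults are only reachable outside Pre_solve (Python raises there)
def pvGrid2Get (g : List (List Int)) (r c : Int) : Int :=
  PySem.List.pyGetD (PySem.List.pyGetD g r []) c 0
-- grid[r][c] = v (out-of-range writes, excluded by Pre_solve, leave g unchanged)
def pvGrid2Set (g : List (List Int)) (r c v : Int) : List (List Int) :=
  PySem.List.pySetD g r (PySem.List.pySetD (PySem.List.pyGetD g r []) c v)
-- row ^ 1: exact for every int (two's-complement xor with 1 flips the last bit)
def pvXor1 (r : Int) : Int := if r % 2 == 0 then r + 1 else r - 1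

def pvSolveStep (n : Int) (st : Int × List (List Int) × PySem.Set (Int × Int × Int × Int))
    (req : Int × Int × Int) : Int × List (List Int) × PySem.Set (Int × Int × Int × Int) :=
  let grid := pvGrid2Set st.2.1 req.1 req.2.1 req.2.2
  let otherRow := pvXor1 req.1
  let blocked :=
    if req.2.2 == 1 then
      [req.2.1 - 1, req.2.1, req.2.1 + 1].foldl (fun b nextCol =>
        if 0 ≤ nextCol ∧ nextCol < 2 * n ∧ pvGrid2Get grid otherRow nextCol == 1 then
          PySem.Set.add b (req.1, req.2.1, otherRow, nextCol) else b) st.2.2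
    else
      [req.2.1 - 1, req.2.1, req.2.1 + 1].foldl (fun b nextCol =>
        PySem.Set.discard (PySem.Set.discard b (req.1, req.2.1, otherRow, nextCol))
          (otherRow, nextCol, req.1, req.2.1)) st.2.2
  (if blocked.isEmpty then st.1 + 1 else st.1, grid, blocked)

def solve (n : Int) (requests : List (Int × Int × Int)) : Int :=
  (requests.foldl (pvSolveStep n)
    (0, List.replicate 2 (List.replicate (2 * n).toNat 0),
      (PySem.Set.empty : PySem.Set (Int × Int × Int × Int)))).1

-- ===== PORT B =====
-- any(grid[0][c] == 1 and any(0 <= d < 2*n and grid[1][d] == 1 for d in (c-1, c, c+1)) for c in range(2*n))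
def pvHasConflict (n : Int) (grid : List (List Int)) : Bool :=
  (PySem.List.pyRange 0 (2 * n) 1).any (fun c =>
    pvGrid2Get grid 0 c == 1 &&
    [c - 1, c, c + 1].any (fun d =>
      decide (0 ≤ d) && decide (d < 2 * n) && (pvGrid2Get grid 1 d == 1)))

def pvAltStep (n : Int) (st : Int × List (List Int)) (req : Int × Int × Int) : Int × List (List Int) :=
  let grid := pvGrid2Set st.2 req.1 req.2.1 req.2.2
  (if !pvHasConflict n grid then st.1 + 1 else st.1, grid)

def solve_alt (n : Int) (requests : List (Int × Int × Int)) : Int :=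
  (requests.foldl (pvAltStep n) (0, List.replicate 2 (List.replicate (2 * n).toNat 0))).1

-- ===== PRECONDITION & SPEC =====
-- Pre_ restricts to the problem's natural 2×2n-grid domain: row in {0,1}, 0 ≤ col < 2n.
-- Rows/cols outside Python's wrap range raise IndexError in A; negative in-wrap-range
-- indices address cells via Python negative-index wraparound, outside the natural domain.
def Pre_solve (n : Int) (requests : List (Int × Int × Int)) : Prop :=
  ∀ req ∈ requests, (req.1 = 0 ∨ req.1 = 1) ∧ 0 ≤ req.2.1 ∧ req.2.1 < 2 * n
instance (n : Int) (requests : List (Int × Int × Int)) : Decidable (Pre_solve n requests) := by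
  unfold Pre_solve; infer_instance
def pvWitness_solve : Int × (List (Int × Int × Int)) := (1, [(0, 0, 1), (1, 1, 1), (1, 1, 0)])
def Spec_solve (n : Int) (requests : List (Int × Int × Int)) (out : Int) : Prop := out = solve_alt n requests
instance (n : Int) (requests : List (Int × Int × Int)) (out : Int) : Decidable (Spec_solve n requests out) := by unfold Spec_solve; infer_instance

-- ===== CLAIM (what is proved, stated in full; the proofs are below) =====
def Claim_equal_solve : Prop := ∀ (n : Int) (requests : List (Int × Int × Int)), Dom_solve n requests → Pre_solve n requests → Spec_solve n requests (solve n requests)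

-- ===== LEMMAS AND PROOFS =====

theorem pvGetD_nonneg (xs : List Int) (i : Int) (h : 0 ≤ i) :
    PySem.List.pyGetD xs i 0 = xs.getD i.toNat 0 := by
  rw [show i = ((i.toNat : Nat) : Int) from (Int.toNat_of_nonneg h).symm, PySem.List.pyGetD_natCast]
  simp [max_eq_left h]

theorem pvGet0 (g0 g1 : List Int) (c : Int) (h : 0 ≤ c) :
    pvGrid2Get [g0, g1] 0 c = g0.getD c.toNat 0 := by
  show PySem.List.pyGetD g0 c 0 = _
  exact pvGetD_nonneg g0 c h

theorem pvGet1 (g0 g1 : List Int) (c : Int) (h : 0 ≤ c) :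
    pvGrid2Get [g0, g1] 1 c = g1.getD c.toNat 0 := by
  show PySem.List.pyGetD g1 c 0 = _
  exact pvGetD_nonneg g1 c h

theorem pvSet0 (g0 g1 : List Int) (c v : Int) (hc : 0 ≤ c) :
    pvGrid2Set [g0, g1] 0 c v = [g0.set c.toNat v, g1] := by
  show PySem.List.pySetD [g0, g1] 0 (PySem.List.pySetD g0 c v) = _
  rw [PySem.List.pySetD_of_nonneg _ _ hc]
  rfl

theorem pvSet1 (g0 g1 : List Int) (c v : Int) (hc : 0 ≤ c) :
    pvGrid2Set [g0, g1] 1 c v = [g0, g1.set c.toNat v] := by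
  show PySem.List.pySetD [g0, g1] 1 (PySem.List.pySetD g1 c v) = _
  rw [PySem.List.pySetD_of_nonneg _ _ hc]
  rfl

theorem pvGetD_set (xs : List Int) (j i : Nat) (v : Int) (hj : j < xs.length) :
    (xs.set j v).getD i 0 = if i = j then v else xs.getD i 0 := by
  by_cases h : i = j
  · subst h
    simp [List.getD_eq_getElem?_getD, hj]
  · rw [if_neg h, List.getD_eq_getElem?_getD, List.getD_eq_getElem?_getD,
        List.getElem?_set_ne (fun hh => h hh.symm)]

theorem pvGetD_replicate (k i : Nat) : (List.replicate k (0:Int)).getD i 0 = 0 := by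
  simp [List.getD_eq_getElem?_getD, List.getElem?_replicate]
  split_ifs <;> rfl

-- (c, d) (c in row 0, d in row 1) is an adjacent conflicting pair of the grid [g0, g1]
abbrev pvConfPair (n : Int) (g0 g1 : List Int) (c d : Int) : Prop :=
  0 ≤ c ∧ c < 2 * n ∧ (d = c - 1 ∨ d = c ∨ d = c + 1) ∧ 0 ≤ d ∧ d < 2 * n ∧
    g0.getD c.toNat 0 = 1 ∧ g1.getD d.toNat 0 = 1

theorem pvHasConflict_iff (n : Int) (g0 g1 : List Int) :
    pvHasConflict n [g0, g1] = true ↔ ∃ c d, pvConfPair n g0 g1 c d := by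
  unfold pvHasConflict pvConfPair
  rw [List.any_eq_true]
  constructor
  · rintro ⟨c, hc, hcond⟩
    rw [PySem.List.mem_pyRange_one] at hc
    rw [Bool.and_eq_true, List.any_eq_true] at hcond
    obtain ⟨hv0, d, hd, hcond2⟩ := hcond
    simp only [Bool.and_eq_true, decide_eq_true_eq, beq_iff_eq] at hv0 hcond2
    obtain ⟨⟨hd0, hd2⟩, hv1⟩ := hcond2
    rw [pvGet0 _ _ _ hc.1] at hv0
    rw [pvGet1 _ _ _ hd0] at hv1
    refine ⟨c, d, hc.1, hc.2, ?_, hd0, hd2, hv0, hv1⟩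
    simpa using hd
  · rintro ⟨c, d, h1, h2, h3, h4, h5, h6, h7⟩
    refine ⟨c, by rw [PySem.List.mem_pyRange_one]; exact ⟨h1, h2⟩, ?_⟩
    rw [Bool.and_eq_true, List.any_eq_true]
    refine ⟨by rw [beq_iff_eq, pvGet0 _ _ _ h1]; exact h6, d, by simpa using h3, ?_⟩
    simp only [Bool.and_eq_true, decide_eq_true_eq, beq_iff_eq]
    exact ⟨⟨h4, h5⟩, by rw [pvGet1 _ _ _ h4]; exact h7⟩

-- membership in the add-loop's result
theorem pvMemAddFold {α β : Type} [BEq α] [LawfulBEq α] (l : List β) (p : β → Prop) [DecidablePred p]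
    (f : β → α) (b : PySem.Set α) (y : α) :
    y ∈ l.foldl (fun b x => if p x then PySem.Set.add b (f x) else b) b ↔
      y ∈ b ∨ ∃ x ∈ l, p x ∧ y = f x := by
  induction l generalizing b with
  | nil => simp
  | cons a l ih =>
    simp only [List.foldl_cons, ih, List.mem_cons]
    by_cases hpa : p a
    · simp only [if_pos hpa, PySem.Set.mem_add]
      constructor
      · rintro (((h | h) | ⟨x, hx, hp, he⟩))
        · exact Or.inl h
        · exact Or.inr ⟨a, Or.inl rfl, hpa, h⟩
        · exact Or.inr ⟨x, Or.inr hx, hp, he⟩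
      · rintro (h | ⟨x, (rfl | hx), hp, he⟩)
        · exact Or.inl (Or.inl h)
        · exact Or.inl (Or.inr he)
        · exact Or.inr ⟨x, hx, hp, he⟩
    · rw [if_neg hpa]
      constructor
      · rintro (h | ⟨x, hx, hp, he⟩)
        · exact Or.inl h
        · exact Or.inr ⟨x, Or.inr hx, hp, he⟩
      · rintro (h | ⟨x, (rfl | hx), hp, he⟩)
        · exact Or.inl h
        · exact absurd hp hpa
        · exact Or.inr ⟨x, hx, hp, he⟩

-- membership in the discard-loop's result
theorem pvMemDiscardFold {α β : Type} [BEq α] [LawfulBEq α] (l : List β)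
    (u w : β → α) (b : PySem.Set α) (y : α) :
    y ∈ l.foldl (fun b x => PySem.Set.discard (PySem.Set.discard b (u x)) (w x)) b ↔
      y ∈ b ∧ ∀ x ∈ l, y ≠ u x ∧ y ≠ w x := by
  induction l generalizing b with
  | nil => simp
  | cons a l ih =>
    simp only [List.foldl_cons, ih, PySem.Set.mem_discard, List.mem_cons]
    constructor
    · rintro ⟨⟨⟨hb, hu⟩, hw⟩, hall⟩
      refine ⟨hb, ?_⟩
      rintro x (rfl | hx)
      · exact ⟨hu, hw⟩
      · exact hall x hx
    · rintro ⟨hb, hall⟩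
      exact ⟨⟨⟨hb, (hall a (Or.inl rfl)).1⟩, (hall a (Or.inl rfl)).2⟩,
        fun x hx => hall x (Or.inr hx)⟩

-- A's blocked set: sound (only directed conflict pairs) and complete (every conflict has a direction)
abbrev pvInv (n : Int) (g0 g1 : List Int) (b : List (Int × Int × Int × Int)) : Prop :=
  (∀ e ∈ b, ∃ c d, pvConfPair n g0 g1 c d ∧ (e = (0, c, 1, d) ∨ e = (1, d, 0, c))) ∧
  (∀ c d, pvConfPair n g0 g1 c d → (0, c, 1, d) ∈ b ∨ (1, d, 0, c) ∈ b)

theorem pvInv_empty_iff (n : Int) (g0 g1 : List Int) (b : List (Int × Int × Int × Int))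
    (h : pvInv n g0 g1 b) : b.isEmpty = !pvHasConflict n [g0, g1] := by
  cases hb : b with
  | nil =>
    have : pvHasConflict n [g0, g1] = false := by
      rw [← Bool.not_eq_true, pvHasConflict_iff]
      rintro ⟨c, d, hcp⟩
      rcases h.2 c d hcp with hm | hm <;> simp [hb] at hm
    simp [this]
  | cons e es =>
    have : pvHasConflict n [g0, g1] = true := by
      rw [pvHasConflict_iff]
      obtain ⟨c, d, hcp, _⟩ := h.1 e (by simp [hb])
      exact ⟨c, d, hcp⟩
    simp [this]

theorem pvStepAdd0 (n : Int) (g0 g1 : List Int) (b : List (Int × Int × Int × Int))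
    (hl0 : g0.length = (2 * n).toNat) (col : Int) (hc : 0 ≤ col) (hc' : col < 2 * n)
    (hinv : pvInv n g0 g1 b) :
    pvInv n (g0.set col.toNat 1) g1
      ([col - 1, col, col + 1].foldl (fun bb x =>
        if 0 ≤ x ∧ x < 2 * n ∧ pvGrid2Get [g0.set col.toNat 1, g1] 1 x == 1 then
          PySem.Set.add bb ((0 : Int), col, (1 : Int), x) else bb) b) := by
  have hlen : col.toNat < g0.length := by omega
  constructor
  · intro e he
    rw [pvMemAddFold] at he
    rcases he with he | ⟨x, hx, ⟨hx0, hx2, hv⟩, rfl⟩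
    · obtain ⟨c, d, ⟨h1, h2, h3, h4, h5, h6, h7⟩, hdir⟩ := hinv.1 e he
      refine ⟨c, d, ⟨h1, h2, h3, h4, h5, ?_, h7⟩, hdir⟩
      rw [pvGetD_set g0 col.toNat c.toNat 1 hlen]
      split_ifs with hh
      · rfl
      · exact h6
    · rw [beq_iff_eq, pvGet1 _ _ _ hx0] at hv
      have hx' : x = col - 1 ∨ x = col ∨ x = col + 1 := by simpa using hx
      refine ⟨col, x, ⟨hc, hc', hx', hx0, hx2, ?_, hv⟩, Or.inl rfl⟩
      rw [pvGetD_set g0 col.toNat col.toNat 1 hlen, if_pos rfl]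
  · intro c d hcp
    obtain ⟨h1, h2, h3, h4, h5, h6, h7⟩ := hcp
    by_cases hcc : c = col
    · subst hcc
      left
      rw [pvMemAddFold]
      right
      refine ⟨d, by simpa using h3, ⟨h4, h5, ?_⟩, rfl⟩
      rw [beq_iff_eq, pvGet1 _ _ _ h4]; exact h7
    · have h6' : g0.getD c.toNat 0 = 1 := by
        rw [pvGetD_set g0 col.toNat c.toNat 1 hlen,
          if_neg (by omega : ¬ c.toNat = col.toNat)] at h6
        exact h6
      rcases hinv.2 c d ⟨h1, h2, h3, h4, h5, h6', h7⟩ with hm | hm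
      · left; rw [pvMemAddFold]; exact Or.inl hm
      · right; rw [pvMemAddFold]; exact Or.inl hm

theorem pvStepDis0 (n : Int) (g0 g1 : List Int) (b : List (Int × Int × Int × Int))
    (hl0 : g0.length = (2 * n).toNat) (col t : Int) (hc : 0 ≤ col) (hc' : col < 2 * n)
    (ht : t ≠ 1) (hinv : pvInv n g0 g1 b) :
    pvInv n (g0.set col.toNat t) g1
      ([col - 1, col, col + 1].foldl (fun bb x =>
        PySem.Set.discard (PySem.Set.discard bb ((0 : Int), col, (1 : Int), x))
          ((1 : Int), x, (0 : Int), col)) b) := by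
  have hlen : col.toNat < g0.length := by omega
  constructor
  · intro e he
    rw [pvMemDiscardFold] at he
    obtain ⟨heb, hall⟩ := he
    obtain ⟨c, d, ⟨h1, h2, h3, h4, h5, h6, h7⟩, hdir⟩ := hinv.1 e heb
    have hcc : c ≠ col := by
      intro hcc; subst hcc
      have hd : d ∈ [c - 1, c, c + 1] := by simpa using h3
      rcases hdir with rfl | rfl
      · exact (hall d hd).1 rfl
      · exact (hall d hd).2 rfl
    refine ⟨c, d, ⟨h1, h2, h3, h4, h5, ?_, h7⟩, hdir⟩
    rw [pvGetD_set g0 col.toNat c.toNat t hlen, if_neg (by omega : ¬ c.toNat = col.toNat)]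
    exact h6
  · intro c d hcp
    obtain ⟨h1, h2, h3, h4, h5, h6, h7⟩ := hcp
    have hcc : c ≠ col := by
      intro hcc; subst hcc
      rw [pvGetD_set g0 c.toNat c.toNat t hlen, if_pos rfl] at h6
      exact ht h6
    have h6' : g0.getD c.toNat 0 = 1 := by
      rw [pvGetD_set g0 col.toNat c.toNat t hlen,
        if_neg (by omega : ¬ c.toNat = col.toNat)] at h6
      exact h6
    rcases hinv.2 c d ⟨h1, h2, h3, h4, h5, h6', h7⟩ with hm | hm
    · left
      rw [pvMemDiscardFold]
      refine ⟨hm, fun x hx => ⟨?_, ?_⟩⟩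
      · exact fun heq => hcc (congrArg (fun p => p.2.1) heq)
      · simp
    · right
      rw [pvMemDiscardFold]
      refine ⟨hm, fun x hx => ⟨?_, ?_⟩⟩
      · simp
      · exact fun heq => hcc (congrArg (fun p => p.2.2.2) heq)

theorem pvStepAdd1 (n : Int) (g0 g1 : List Int) (b : List (Int × Int × Int × Int))
    (hl1 : g1.length = (2 * n).toNat) (col : Int) (hc : 0 ≤ col) (hc' : col < 2 * n)
    (hinv : pvInv n g0 g1 b) :
    pvInv n g0 (g1.set col.toNat 1)
      ([col - 1, col, col + 1].foldl (fun bb x =>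
        if 0 ≤ x ∧ x < 2 * n ∧ pvGrid2Get [g0, g1.set col.toNat 1] 0 x == 1 then
          PySem.Set.add bb ((1 : Int), col, (0 : Int), x) else bb) b) := by
  have hlen : col.toNat < g1.length := by omega
  constructor
  · intro e he
    rw [pvMemAddFold] at he
    rcases he with he | ⟨x, hx, ⟨hx0, hx2, hv⟩, rfl⟩
    · obtain ⟨c, d, ⟨h1, h2, h3, h4, h5, h6, h7⟩, hdir⟩ := hinv.1 e he
      refine ⟨c, d, ⟨h1, h2, h3, h4, h5, h6, ?_⟩, hdir⟩
      rw [pvGetD_set g1 col.toNat d.toNat 1 hlen]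
      split_ifs with hh
      · rfl
      · exact h7
    · rw [beq_iff_eq, pvGet0 _ _ _ hx0] at hv
      have hx' : x = col - 1 ∨ x = col ∨ x = col + 1 := by simpa using hx
      refine ⟨x, col, ⟨hx0, hx2, by omega, hc, hc', hv, ?_⟩, Or.inr rfl⟩
      rw [pvGetD_set g1 col.toNat col.toNat 1 hlen, if_pos rfl]
  · intro c d hcp
    obtain ⟨h1, h2, h3, h4, h5, h6, h7⟩ := hcp
    by_cases hdd : d = col
    · subst hdd
      right
      rw [pvMemAddFold]
      right
      refine ⟨c, by simp; omega, ⟨h1, h2, ?_⟩, rfl⟩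
      rw [beq_iff_eq, pvGet0 _ _ _ h1]; exact h6
    · have h7' : g1.getD d.toNat 0 = 1 := by
        rw [pvGetD_set g1 col.toNat d.toNat 1 hlen,
          if_neg (by omega : ¬ d.toNat = col.toNat)] at h7
        exact h7
      rcases hinv.2 c d ⟨h1, h2, h3, h4, h5, h6, h7'⟩ with hm | hm
      · left; rw [pvMemAddFold]; exact Or.inl hm
      · right; rw [pvMemAddFold]; exact Or.inl hm

theorem pvStepDis1 (n : Int) (g0 g1 : List Int) (b : List (Int × Int × Int × Int))
    (hl1 : g1.length = (2 * n).toNat) (col t : Int) (hc : 0 ≤ col) (hc' : col < 2 * n)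
    (ht : t ≠ 1) (hinv : pvInv n g0 g1 b) :
    pvInv n g0 (g1.set col.toNat t)
      ([col - 1, col, col + 1].foldl (fun bb x =>
        PySem.Set.discard (PySem.Set.discard bb ((1 : Int), col, (0 : Int), x))
          ((0 : Int), x, (1 : Int), col)) b) := by
  have hlen : col.toNat < g1.length := by omega
  constructor
  · intro e he
    rw [pvMemDiscardFold] at he
    obtain ⟨heb, hall⟩ := he
    obtain ⟨c, d, ⟨h1, h2, h3, h4, h5, h6, h7⟩, hdir⟩ := hinv.1 e heb
    have hdd : d ≠ col := by
      intro hdd; subst hdd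
      have hcm : c ∈ [d - 1, d, d + 1] := by simp; omega
      rcases hdir with rfl | rfl
      · exact (hall c hcm).2 rfl
      · exact (hall c hcm).1 rfl
    refine ⟨c, d, ⟨h1, h2, h3, h4, h5, h6, ?_⟩, hdir⟩
    rw [pvGetD_set g1 col.toNat d.toNat t hlen, if_neg (by omega : ¬ d.toNat = col.toNat)]
    exact h7
  · intro c d hcp
    obtain ⟨h1, h2, h3, h4, h5, h6, h7⟩ := hcp
    have hdd : d ≠ col := by
      intro hdd; subst hdd
      rw [pvGetD_set g1 d.toNat d.toNat t hlen, if_pos rfl] at h7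
      exact ht h7
    have h7' : g1.getD d.toNat 0 = 1 := by
      rw [pvGetD_set g1 col.toNat d.toNat t hlen,
        if_neg (by omega : ¬ d.toNat = col.toNat)] at h7
      exact h7
    rcases hinv.2 c d ⟨h1, h2, h3, h4, h5, h6, h7'⟩ with hm | hm
    · left
      rw [pvMemDiscardFold]
      refine ⟨hm, fun x hx => ⟨?_, ?_⟩⟩
      · simp
      · exact fun heq => hdd (congrArg (fun p => p.2.2.2) heq)
    · right
      rw [pvMemDiscardFold]
      refine ⟨hm, fun x hx => ⟨?_, ?_⟩⟩
      · exact fun heq => hdd (congrArg (fun p => p.2.1) heq)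
      · simp

theorem pvXor1_zero : pvXor1 0 = 1 := rfl
theorem pvXor1_one : pvXor1 1 = 0 := rfl

theorem pvMain (n : Int) (reqs : List (Int × Int × Int)) :
    ∀ (res : Int) (g0 g1 : List Int) (b : List (Int × Int × Int × Int)),
      (∀ req ∈ reqs, (req.1 = 0 ∨ req.1 = 1) ∧ 0 ≤ req.2.1 ∧ req.2.1 < 2 * n) →
      g0.length = (2 * n).toNat → g1.length = (2 * n).toNat → pvInv n g0 g1 b →
      (reqs.foldl (pvSolveStep n) (res, [g0, g1], b)).1 =
      (reqs.foldl (pvAltStep n) (res, [g0, g1])).1 := by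
  induction reqs with
  | nil => intro res g0 g1 b _ _ _ _; rfl
  | cons req reqs ih =>
    intro res g0 g1 b hpre hl0 hl1 hinv
    obtain ⟨row, col, t⟩ := req
    obtain ⟨hrow, hc, hc'⟩ := hpre _ (List.mem_cons_self ..)
    have hrest := fun r hr => hpre r (List.mem_cons_of_mem _ hr)
    simp only [List.foldl_cons]
    rcases hrow with rfl | rfl
    · by_cases ht : t = 1
      · subst ht
        have hinv' := pvStepAdd0 n g0 g1 b hl0 col hc hc' hinv
        simp only [pvSolveStep, pvAltStep, pvXor1_zero, pvSet0 g0 g1 col 1 hc,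
          beq_self_eq_true, if_true]
        rw [pvInv_empty_iff _ _ _ _ hinv']
        exact ih _ _ _ _ hrest (by simpa using hl0) hl1 hinv'
      · have hinv' := pvStepDis0 n g0 g1 b hl0 col t hc hc' ht hinv
        have htb : (t == 1) = false := by simp [ht]
        simp only [pvSolveStep, pvAltStep, pvXor1_zero, pvSet0 g0 g1 col t hc,
          htb, Bool.false_eq_true, if_false]
        rw [pvInv_empty_iff _ _ _ _ hinv']
        exact ih _ _ _ _ hrest (by simpa using hl0) hl1 hinv'
    · by_cases ht : t = 1
      · subst ht
        have hinv' := pvStepAdd1 n g0 g1 b hl1 col hc hc' hinv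
        simp only [pvSolveStep, pvAltStep, pvXor1_one, pvSet1 g0 g1 col 1 hc,
          beq_self_eq_true, if_true]
        rw [pvInv_empty_iff _ _ _ _ hinv']
        exact ih _ _ _ _ hrest hl0 (by simpa using hl1) hinv'
      · have hinv' := pvStepDis1 n g0 g1 b hl1 col t hc hc' ht hinv
        have htb : (t == 1) = false := by simp [ht]
        simp only [pvSolveStep, pvAltStep, pvXor1_one, pvSet1 g0 g1 col t hc,
          htb, Bool.false_eq_true, if_false]
        rw [pvInv_empty_iff _ _ _ _ hinv']
        exact ih _ _ _ _ hrest hl0 (by simpa using hl1) hinv'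

-- ===== VERDICT (by name: the statement is the Claim_ definition above) =====
theorem solve_spec : Claim_equal_solve := by
  intro n requests _ hpre
  unfold Pre_solve at hpre
  unfold Spec_solve solve solve_alt
  have hinv0 : pvInv n (List.replicate (2 * n).toNat 0) (List.replicate (2 * n).toNat 0) [] := by
    constructor
    · intro e he; simp at he
    · intro c d hcp
      obtain ⟨-, -, -, -, -, h6, -⟩ := hcp
      rw [pvGetD_replicate] at h6
      exact absurd h6 (by norm_num)
  exact pvMain n requests 0 _ _ [] hpre (by simp) (by simp) hinv0
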